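-- pv_equiv track=rewrite | github.com/helgefmi/aoc2019 | day18/part1_faster.py | find_stuff
-- ===== SOURCE A (Python) =====
-- from typing import List, Tuple, Dict
--
-- Area = List[List[str]]
--
-- def find_stuff(area: Area):
--     keys = {}
--     doors = {}
--     player = (0, 0)
--     for y, row in enumerate(area):
--         for x, c in enumerate(row):
--             if 'a' <= c <= 'z':
--                 keys[c] = (x, y)
--             elif 'A' <= c <= 'Z':
--                 doors[c] = (x, y)
--             elif c == '@':
--                 player = (x, y)
--
--     return player, keys, doors
-- ===== SOURCE B (Python) =====
-- def find_stuff(area):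
--     # B: three independent passes over a flattened cell list instead of A's
--     # single branching loop; dict-comprehension last-write-wins matches A's
--     # repeated assignment, and the last '@' wins as in A.
--     cells = [(c, x, y) for y, row in enumerate(area) for x, c in enumerate(row)]
--     keys = {c: (x, y) for (c, x, y) in cells if 'a' <= c <= 'z'}
--     doors = {c: (x, y) for (c, x, y) in cells if 'A' <= c <= 'Z'}
--     players = [(x, y) for (c, x, y) in cells if c == '@']
--     player = players[-1] if players else (0, 0)
--     return player, keys, doors
-- ===== Notes on version B (the rewrite author's own statement) =====
-- stated objective: simpler
-- what changed: Replaces the single stateful loop with an if/elif chain by a flattened cell list and three independent comprehension-style passes (keys dict, doors dict, last-'@' player), with no mutable state threaded through the scan.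
import Mathlib
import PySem

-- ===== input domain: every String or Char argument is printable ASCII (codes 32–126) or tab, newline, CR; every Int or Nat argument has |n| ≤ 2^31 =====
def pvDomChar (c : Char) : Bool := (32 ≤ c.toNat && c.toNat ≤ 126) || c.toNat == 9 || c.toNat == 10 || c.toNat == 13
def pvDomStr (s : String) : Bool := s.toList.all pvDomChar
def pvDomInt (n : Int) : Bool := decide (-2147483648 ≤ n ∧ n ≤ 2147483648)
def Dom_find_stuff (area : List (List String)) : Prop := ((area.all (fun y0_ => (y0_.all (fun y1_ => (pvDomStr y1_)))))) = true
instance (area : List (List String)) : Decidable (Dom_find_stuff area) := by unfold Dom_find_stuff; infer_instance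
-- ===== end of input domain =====

-- B replaces A's single stateful branching loop by a flattened cell list and three
-- independent passes (keys dict, doors dict, last-'@' player): simpler decomposition, no speed claim.

-- Python's lexicographic string '<=' ported by hand over List Char (exact: Python compares
-- code points, Lean's Char '<' is code-point order).
def pyStrLeChars : List Char → List Char → Bool
  | [], _ => true
  | _ :: _, [] => false
  | x :: xs, y :: ys => if x = y then pyStrLeChars xs ys else decide (x < y)

-- s1 <= s2 in Python
def pvStrLe (a b : String) : Bool := pyStrLeChars a.toList b.toList

-- 'a' <= c <= 'z' in Python
def pvIsKey (c : String) : Bool := pvStrLe "a" c && pvStrLe c "z"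
-- 'A' <= c <= 'Z' in Python
def pvIsDoor (c : String) : Bool := pvStrLe "A" c && pvStrLe c "Z"

-- ===== PORT A =====
def find_stuff (area : List (List String)) : (Int × Int) × (List (String × Int × Int)) × (List (String × Int × Int)) :=
  let st := (PySem.List.enumerate area).foldl
    (fun st yr =>
      (PySem.List.enumerate yr.2).foldl
        (fun st xc =>
          if pvIsKey xc.2 then (st.1, st.2.1.insert xc.2 (xc.1, yr.1), st.2.2)
          else if pvIsDoor xc.2 then (st.1, st.2.1, st.2.2.insert xc.2 (xc.1, yr.1))
          else if xc.2 == "@" then ((xc.1, yr.1), st.2.1, st.2.2)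
          else st) st)
    (((0 : Int), (0 : Int)),
      (PySem.Dict.empty : PySem.Dict String (Int × Int)),
      (PySem.Dict.empty : PySem.Dict String (Int × Int)))
  (st.1, st.2.1.items, st.2.2.items)

-- ===== PORT B =====
-- the flattened cell list [(c, x, y) …]
def pvCells (area : List (List String)) : List (String × Int × Int) :=
  (PySem.List.enumerate area).flatMap (fun yr =>
    (PySem.List.enumerate yr.2).map (fun xc => (xc.2, xc.1, yr.1)))

def find_stuff_alt (area : List (List String)) : (Int × Int) × (List (String × Int × Int)) × (List (String × Int × Int)) :=
  let cells := pvCells area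
  let keys : PySem.Dict String (Int × Int) := PySem.Dict.ofList (cells.filter (fun q => pvIsKey q.1))
  let doors : PySem.Dict String (Int × Int) := PySem.Dict.ofList (cells.filter (fun q => pvIsDoor q.1))
  let players := (cells.filter (fun q => q.1 == "@")).map (·.2)
  (players.getLast?.getD (0, 0), keys.items, doors.items)

-- ===== PRECONDITION & SPEC =====
def Spec_find_stuff (area : List (List String)) (out : (Int × Int) × (List (String × Int × Int)) × (List (String × Int × Int))) : Prop := out = find_stuff_alt area
instance (area : List (List String)) (out : (Int × Int) × (List (String × Int × Int)) × (List (String × Int × Int))) : Decidable (Spec_find_stuff area out) := by unfold Spec_find_stuff; infer_instance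

-- ===== CLAIM (what is proved, stated in full; the proofs are below) =====
def Claim_equal_find_stuff : Prop := ∀ (area : List (List String)), Dom_find_stuff area → Spec_find_stuff area (find_stuff area)

-- ===== LEMMAS AND PROOFS =====

-- A's loop body, in cell form (c, (x, y))
def pvStepA (st : (Int × Int) × PySem.Dict String (Int × Int) × PySem.Dict String (Int × Int))
    (q : String × Int × Int) : (Int × Int) × PySem.Dict String (Int × Int) × PySem.Dict String (Int × Int) :=
  if pvIsKey q.1 then (st.1, st.2.1.insert q.1 q.2, st.2.2)
  else if pvIsDoor q.1 then (st.1, st.2.1, st.2.2.insert q.1 q.2)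
  else if q.1 == "@" then (q.2, st.2.1, st.2.2)
  else st

theorem pvIsDoor_of_key {c : String} (h : pvIsKey c = true) : pvIsDoor c = false := by
  unfold pvIsKey pvStrLe at h
  unfold pvIsDoor pvStrLe
  rcases hc : c.toList with _ | ⟨y, ys⟩
  · rw [hc] at h; exact absurd h (by decide)
  · rw [hc] at h
    simp only [Bool.and_eq_true] at h
    obtain ⟨h1, _⟩ := h
    have hy : 'a' ≤ y := by
      by_contra hlt
      simp [pyStrLeChars, show ('a' : Char) ≠ y from fun he => hlt (he ▸ le_refl _)] at h1
      exact hlt (le_of_lt h1)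
    simp only [Bool.and_eq_false_iff]
    right
    by_cases hz : y = 'Z'
    · exact absurd (hz ▸ hy) (by decide)
    · rw [show ("Z" : String).toList = ['Z'] by decide]
      simp only [pyStrLeChars, if_neg hz, decide_eq_false_iff_not, not_lt]
      exact le_trans (by decide) hy

theorem pvAt_of_key {c : String} (h : pvIsKey c = true) : (c == "@") = false := by
  by_contra hne
  have : c = "@" := by
    have := Bool.not_eq_false (c == "@") |>.mp hne
    exact eq_of_beq this
  rw [this] at h
  exact absurd h (by decide)

theorem pvAt_of_door {c : String} (h : pvIsDoor c = true) : (c == "@") = false := by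
  by_contra hne
  have : c = "@" := by
    have := Bool.not_eq_false (c == "@") |>.mp hne
    exact eq_of_beq this
  rw [this] at h
  exact absurd h (by decide)

theorem pv_getLast?_getD_cons {α : Type} (a : α) (l : List α) (d : α) :
    ((a :: l).getLast?).getD d = l.getLast?.getD a := by
  simp [List.getLast?_cons]

-- A's combined fold over the cells decomposes into three independent passes.
theorem pv_loop_eq (L : List (String × Int × Int)) (p : Int × Int)
    (k d : PySem.Dict String (Int × Int)) :
    L.foldl pvStepA (p, k, d) =
      ( ((L.filter (fun q => q.1 == "@")).map (·.2)).getLast?.getD p,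
        (L.filter (fun q => pvIsKey q.1)).foldl (fun dd q => dd.insert q.1 q.2) k,
        (L.filter (fun q => pvIsDoor q.1)).foldl (fun dd q => dd.insert q.1 q.2) d ) := by
  induction L generalizing p k d with
  | nil => simp
  | cons q rest ih =>
    by_cases hk : pvIsKey q.1 = true
    · have hd := pvIsDoor_of_key hk
      have ha := pvAt_of_key hk
      rw [List.foldl_cons,
        show pvStepA (p, k, d) q = (p, k.insert q.1 q.2, d) by simp [pvStepA, hk],
        ih p (k.insert q.1 q.2) d]
      simp [hk, hd, ha]
    · by_cases hd : pvIsDoor q.1 = true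
      · have ha := pvAt_of_door hd
        rw [List.foldl_cons,
          show pvStepA (p, k, d) q = (p, k, d.insert q.1 q.2) by simp [pvStepA, hk, hd],
          ih p k (d.insert q.1 q.2)]
        simp [hk, hd, ha]
      · by_cases ha : (q.1 == "@") = true
        · rw [List.foldl_cons,
            show pvStepA (p, k, d) q = (q.2, k, d) by simp [pvStepA, hk, hd, ha],
            ih q.2 k d]
          simp [hk, hd, ha, pv_getLast?_getD_cons]
        · rw [List.foldl_cons,
            show pvStepA (p, k, d) q = (p, k, d) by simp [pvStepA, hk, hd, ha],
            ih p k d]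
          simp [hk, hd, ha]

theorem pv_foldl_flatMap {α β σ : Type} (f : σ → β → σ) (g : α → List β) (l : List α) (s : σ) :
    l.foldl (fun s a => (g a).foldl f s) s = (l.flatMap g).foldl f s := by
  induction l generalizing s with
  | nil => simp
  | cons a t ih => simp [List.flatMap_cons, List.foldl_append, ih]

-- A's nested enumerate loops are exactly the fold of pvStepA over the flattened cells.
theorem pv_find_stuff_eq_cells (area : List (List String)) :
    find_stuff area =
      (let st := (pvCells area).foldl pvStepA
          (((0 : Int), (0 : Int)),
            (PySem.Dict.empty : PySem.Dict String (Int × Int)),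
            (PySem.Dict.empty : PySem.Dict String (Int × Int)));
        (st.1, st.2.1.items, st.2.2.items)) := by
  unfold find_stuff pvCells
  rw [← pv_foldl_flatMap]
  simp only [List.foldl_map, pvStepA]

-- ===== VERDICT (by name: the statement is the Claim_ definition above) =====
theorem find_stuff_spec : Claim_equal_find_stuff := by
  intro area _
  unfold Spec_find_stuff find_stuff_alt
  rw [pv_find_stuff_eq_cells, pv_loop_eq]
  rfl
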